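-- pv_equiv track=rewrite | github.com/nnnnnzo/Cryptogra | defisSansBoucles.py | recConcat
-- ===== SOURCE A (Python) =====
-- def recConcat(c, tab):
--     string = ""
--     c += 1
--     if c <= len(tab):
--         string += tab[c-1]
--         return string + recConcat(c, tab)
--
--     else:
--         return string
-- ===== SOURCE B (Python) =====
-- def recConcat(c, tab):
--     return "".join(tab[i] for i in range(c, len(tab)))
-- ===== Notes on version B (the rewrite author's own statement) =====
-- stated objective: simpler
-- what changed: Replaces the self-recursive string concatenation with a single join over range(c, len(tab)), using plain indexing so negative c keeps Python's wraparound behaviour.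
import Mathlib
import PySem

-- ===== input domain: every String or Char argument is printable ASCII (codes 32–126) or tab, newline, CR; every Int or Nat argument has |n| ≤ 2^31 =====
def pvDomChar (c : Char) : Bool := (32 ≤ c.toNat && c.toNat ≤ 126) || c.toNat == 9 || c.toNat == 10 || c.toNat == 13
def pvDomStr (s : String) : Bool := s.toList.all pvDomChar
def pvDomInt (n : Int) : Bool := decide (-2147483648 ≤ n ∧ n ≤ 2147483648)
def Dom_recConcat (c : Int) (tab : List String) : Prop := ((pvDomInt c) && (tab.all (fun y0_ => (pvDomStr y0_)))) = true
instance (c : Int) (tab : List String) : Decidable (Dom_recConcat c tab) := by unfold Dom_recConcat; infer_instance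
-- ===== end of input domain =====

-- B replaces A's recursion by one join over range(c, len(tab)); objective: simpler.


-- ===== PORT A =====
-- A: string = ""; c += 1; if c <= len(tab): return tab[c-1] + recConcat(c, tab) else "".
-- tab[c-1] uses Python indexing (negative wraps, out of range raises): PySem.List.pyGet?;
-- on the IndexError path (none) Python raises — excluded by Pre_, port returns "" there.
def recConcat (c : Int) (tab : List String) : String :=
  if _h : c + 1 ≤ (tab.length : Int) then
    ("" ++ (PySem.List.pyGet? tab ((c + 1) - 1)).getD "") ++ recConcat (c + 1) tab
  else ""
termination_by ((tab.length : Int) - c).toNat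
decreasing_by omega

-- ===== PORT B =====
def recConcat_alt (c : Int) (tab : List String) : String :=
  PySem.Str.join "" ((PySem.List.pyRange c (tab.length : Int) 1).map
    (fun i => (PySem.List.pyGet? tab i).getD ""))

-- ===== PRECONDITION & SPEC =====
-- Pre_ excludes exactly the inputs where Python A raises IndexError (c < -len(tab)); B raises there too.
def Pre_recConcat (c : Int) (tab : List String) : Prop := -(tab.length : Int) ≤ c
instance (c : Int) (tab : List String) : Decidable (Pre_recConcat c tab) := by unfold Pre_recConcat; infer_instance
def pvWitness_recConcat : Int × List String := (0, ["ab", "cd"])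
def Spec_recConcat (c : Int) (tab : List String) (out : String) : Prop := out = recConcat_alt c tab
instance (c : Int) (tab : List String) (out : String) : Decidable (Spec_recConcat c tab out) := by unfold Spec_recConcat; infer_instance

-- ===== CLAIM =====
def Claim_equal_recConcat : Prop := ∀ (c : Int) (tab : List String), Dom_recConcat c tab → Pre_recConcat c tab → Spec_recConcat c tab (recConcat c tab)

-- ===== LEMMAS AND PROOFS =====
lemma str_join_empty_cons (x : String) (l : List String) :
    PySem.Str.join "" (x :: l) = x ++ PySem.Str.join "" l := by
  cases l with
  | nil => simp [PySem.Str.join, PySem.Chars.join, List.intercalate]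
  | cons y ys => simp [PySem.Str.join, PySem.Chars.join_cons_cons]

lemma recConcat_eq_join (c : Int) (tab : List String) (hc : -(tab.length : Int) ≤ c) :
    recConcat c tab = recConcat_alt c tab := by
  by_cases h : c + 1 ≤ (tab.length : Int)
  · have ih := recConcat_eq_join (c + 1) tab (by omega)
    rw [recConcat, dif_pos h, ih]
    have hlt : c < (tab.length : Int) := by omega
    unfold recConcat_alt
    rw [PySem.List.pyRange_one_cons hlt, List.map_cons, str_join_empty_cons]
    simp
  · rw [recConcat, dif_neg h]
    unfold recConcat_alt
    rw [PySem.List.pyRange_one_eq_nil (by omega)]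
    simp [PySem.Str.join, PySem.Chars.join, List.intercalate]
termination_by ((tab.length : Int) - c).toNat
decreasing_by omega

-- ===== VERDICT =====
theorem recConcat_spec : Claim_equal_recConcat := by
  intro c tab _ hpre
  exact recConcat_eq_join c tab hpre
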